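-- pv_equiv track=rewrite | github.com/Sava-Lakicevic/IoT_Smart_House | IoT_Smart_House.py | perHourMotion
-- ===== SOURCE A (Python) =====
-- def perHourMotion(data):
--     tempData = []
--     perHourData = []
--     for i in range(len(data)):
--         tempData.append(data[i])
--         if (i+1)%6==0:
--             perHourData.append(tempData[-1]-tempData[0])
--             tempData.clear()
--     if tempData:
--         perHourData.append(tempData[-1]-tempData[0])
--     return perHourData
-- ===== SOURCE B (Python) =====
-- def perHourMotion(data):
--     n = len(data)
--     return [data[min(i + 5, n - 1)] - data[i] for i in range(0, n, 6)]
-- ===== Notes on version B (the rewrite author's own statement) =====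
-- stated objective: simpler
-- what changed: Replaces the per-element loop with its temp buffer, (i+1)%6 counter, clear() and separate trailing-chunk flush by a single comprehension striding over chunk start indices (range(0, n, 6)) and indexing each chunk's first and clamped last element directly.
import Mathlib
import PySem

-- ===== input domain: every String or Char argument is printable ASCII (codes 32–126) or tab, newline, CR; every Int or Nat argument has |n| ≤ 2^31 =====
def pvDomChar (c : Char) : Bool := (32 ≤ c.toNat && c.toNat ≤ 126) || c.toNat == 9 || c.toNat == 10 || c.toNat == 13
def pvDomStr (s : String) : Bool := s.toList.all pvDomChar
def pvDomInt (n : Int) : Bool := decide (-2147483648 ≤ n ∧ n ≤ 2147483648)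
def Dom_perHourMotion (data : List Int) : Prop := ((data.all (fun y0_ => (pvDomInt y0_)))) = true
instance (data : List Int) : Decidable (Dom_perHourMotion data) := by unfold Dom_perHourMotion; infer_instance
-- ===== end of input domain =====

-- B replaces A's element-by-element loop (temp buffer, (i+1)%6 counter, clear(), trailing flush)
-- by one comprehension over chunk start indices with direct clamped indexing; objective: simpler.

-- ===== PORT A =====
-- the for-loop over range(len(data)): state = (current index i, tempData, perHourData)
def loopA : List Int → Nat → List Int → List Int → List Int × List Int
  | [], _, temp, out => (temp, out)
  | x :: xs, i, temp, out =>
    let temp' := temp ++ [x]                              -- tempData.append(data[i])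
    if (i + 1) % 6 = 0 then
      loopA xs (i + 1) []
        (out ++ [PySem.List.pyGetD temp' (-1) 0 - PySem.List.pyGetD temp' 0 0])
    else
      loopA xs (i + 1) temp' out

def perHourMotion (data : List Int) : List Int :=
  let r := loopA data 0 [] []
  if r.1 ≠ [] then                                        -- if tempData:
    r.2 ++ [PySem.List.pyGetD r.1 (-1) 0 - PySem.List.pyGetD r.1 0 0]
  else r.2

-- ===== PORT B =====
def perHourMotion_alt (data : List Int) : List Int :=
  let n : Int := data.length
  (PySem.List.pyRange 0 n 6).map (fun i =>
    PySem.List.pyGetD data (min (i + 5) (n - 1)) 0 - PySem.List.pyGetD data i 0)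

-- ===== PRECONDITION & SPEC =====
def Spec_perHourMotion (data : List Int) (out : List Int) : Prop := out = perHourMotion_alt data
instance (data : List Int) (out : List Int) : Decidable (Spec_perHourMotion data out) := by unfold Spec_perHourMotion; infer_instance

-- ===== CLAIM (what is proved, stated in full; the proofs are below) =====
def Claim_equal_perHourMotion : Prop := ∀ (data : List Int), Dom_perHourMotion data → Spec_perHourMotion data (perHourMotion data)

-- ===== LEMMAS AND PROOFS =====

-- common shape: one difference per 6-element chunk, short final chunk handled like the rest
def chunk6 : List Int → List Int
  | [] => []
  | x :: xs => ((x :: xs).getD (min 5 xs.length) 0 - x) :: chunk6 (xs.drop 5)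
  termination_by l => l.length
  decreasing_by simp

-- finishing step of A: the trailing flush applied to the loop's final state
def finishA (r : List Int × List Int) : List Int :=
  if r.1 ≠ [] then r.2 ++ [PySem.List.pyGetD r.1 (-1) 0 - PySem.List.pyGetD r.1 0 0] else r.2

theorem pyRange_pos_cons (a b s : Int) (hab : a < b) (hs : 0 < s) :
    PySem.List.pyRange a b s = a :: PySem.List.pyRange (a + s) b s := by
  rw [PySem.List.pyRange_of_pos _ _ hs, PySem.List.pyRange_of_pos _ _ hs]
  have hcnt : ((b - a + s - 1) / s).toNat
      = (if a + s < b then ((b - (a + s) + s - 1) / s).toNat else 0) + 1 := by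
    have h1 : b - a + s - 1 = (b - a - 1) + 1 * s := by ring
    have h2 : (b - a - 1 + 1 * s) / s = (b - a - 1) / s + 1 := by
      rw [Int.add_mul_ediv_right _ _ (by omega)]
    have h3 : 0 ≤ (b - a - 1) / s := Int.ediv_nonneg (by omega) (by omega)
    by_cases hlt : a + s < b
    · simp only [hlt, if_true]
      have : b - (a + s) + s - 1 = b - a - 1 := by ring
      rw [this, h1, h2]; omega
    · simp only [hlt, if_false]
      have h4 : (b - a - 1) / s = 0 := by
        apply Int.ediv_eq_zero_of_lt (by omega) (by omega)
      rw [h1, h2, h4]; omega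
  rw [if_pos hab, hcnt, List.range_succ_eq_map]
  simp only [List.map_cons, List.map_map, Nat.cast_zero, mul_zero, add_zero]
  congr 1
  apply List.map_congr_left; intro k _; simp only [Function.comp_apply]; push_cast; ring

theorem pyRange_pos_nil (a b s : Int) (hab : ¬ a < b) (hs : 0 < s) :
    PySem.List.pyRange a b s = [] := by
  rw [PySem.List.pyRange_of_pos _ _ hs, if_neg hab]; simp

-- A's loop, started at a multiple of 6 with an empty buffer, followed by the trailing
-- flush, produces exactly the per-chunk differences.
theorem loopA_chunk6 : ∀ (n : Nat) (l : List Int), l.length ≤ n →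
    ∀ (q : Nat) (out : List Int), finishA (loopA l (6 * q) [] out) = out ++ chunk6 l := by
  intro n
  induction n with
  | zero =>
    intro l hl q out
    have : l = [] := List.eq_nil_of_length_eq_zero (by omega)
    subst this
    simp [loopA, finishA, chunk6]
  | succ n ih =>
    intro l hl q out
    have h1 : (6 * q + 1) % 6 = 1 := by omega
    have h2 : (6 * q + 1 + 1) % 6 = 2 := by omega
    have h3 : (6 * q + 1 + 1 + 1) % 6 = 3 := by omega
    have h4 : (6 * q + 1 + 1 + 1 + 1) % 6 = 4 := by omega
    have h5 : (6 * q + 1 + 1 + 1 + 1 + 1) % 6 = 5 := by omega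
    have h6 : (6 * q + 1 + 1 + 1 + 1 + 1 + 1) % 6 = 0 := by omega
    match l with
    | [] => simp [loopA, finishA, chunk6]
    | [a] =>
      simp [loopA, h1, finishA, chunk6, PySem.List.pyGetD, PySem.List.pyGet?, PySem.List.pyIdx?]
    | [a, b] =>
      simp [loopA, h1, h2, finishA, chunk6, PySem.List.pyGetD, PySem.List.pyGet?, PySem.List.pyIdx?]
    | [a, b, c] =>
      simp [loopA, h1, h2, h3, finishA, chunk6, PySem.List.pyGetD, PySem.List.pyGet?, PySem.List.pyIdx?]
    | [a, b, c, d] =>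
      simp [loopA, h1, h2, h3, h4, finishA, chunk6, PySem.List.pyGetD, PySem.List.pyGet?, PySem.List.pyIdx?]
    | [a, b, c, d, e] =>
      simp [loopA, h1, h2, h3, h4, h5, finishA, chunk6, PySem.List.pyGetD, PySem.List.pyGet?, PySem.List.pyIdx?]
    | a :: b :: c :: d :: e :: f :: rest =>
      have hstep : loopA (a :: b :: c :: d :: e :: f :: rest) (6 * q) [] out
          = loopA rest (6 * (q + 1)) [] (out ++ [f - a]) := by
        simp [loopA, h1, h2, h3, h4, h5, h6, PySem.List.pyGetD, PySem.List.pyGet?,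
          PySem.List.pyIdx?]
        ring_nf
      rw [hstep, ih rest (by simp at hl ⊢; omega) (q + 1) (out ++ [f - a])]
      have hc : chunk6 (a :: b :: c :: d :: e :: f :: rest) = (f - a) :: chunk6 rest := by
        rw [chunk6]
        simp
      rw [hc]; simp

-- B's comprehension, started at chunk index j, produces the per-chunk differences of drop j.
theorem altB_chunk6 (data : List Int) : ∀ (n : Nat) (j : Nat), data.length - j ≤ n →
    (PySem.List.pyRange (j : Int) (data.length : Int) 6).map (fun i =>
      PySem.List.pyGetD data (min (i + 5) ((data.length : Int) - 1)) 0
        - PySem.List.pyGetD data i 0) = chunk6 (data.drop j) := by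
  intro n
  induction n with
  | zero =>
    intro j hj
    rw [pyRange_pos_nil _ _ _ (by exact_mod_cast by omega) (by norm_num)]
    have : data.drop j = [] := List.drop_eq_nil_of_le (by omega)
    rw [this, chunk6]; rfl
  | succ n ih =>
    intro j hj
    by_cases hlt : j < data.length
    · rw [pyRange_pos_cons _ _ _ (by exact_mod_cast hlt) (by norm_num), List.map_cons]
      have hcast : ((j : Int) + 6) = ((j + 6 : Nat) : Int) := by push_cast; ring
      rw [hcast, ih (j + 6) (by omega)]
      -- the tail of drop j
      obtain ⟨x, xs, hxxs⟩ : ∃ x xs, data.drop j = x :: xs := by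
        rcases h : data.drop j with _ | ⟨x, xs⟩
        · exfalso; have := List.length_drop (l := data) (i := j); rw [h] at this; simp at this; omega
        · exact ⟨x, xs, rfl⟩
      have hdrop6 : data.drop (j + 6) = xs.drop 5 := by
        have : data.drop (j + 6) = (data.drop j).drop 6 := by rw [List.drop_drop]
        rw [this, hxxs]; simp
      rw [hdrop6, hxxs, chunk6]
      have hlen : data.length = j + 1 + xs.length := by
        have := List.length_drop (l := data) (i := j); rw [hxxs] at this; simp at this; omega
      have hhead : PySem.List.pyGetD data (j : Int) 0 = x := by
        rw [PySem.List.pyGetD_natCast]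
        have h0 : (data.drop j)[0]? = some x := by rw [hxxs]; rfl
        rw [List.getElem?_drop] at h0
        simp only [Nat.add_zero] at h0
        simp [List.getD, h0]
      have hmin : min ((j : Int) + 5) ((data.length : Int) - 1)
          = ((j + min 5 xs.length : Nat) : Int) := by
        rw [hlen]; push_cast; omega
      have hlast : PySem.List.pyGetD data (min ((j : Int) + 5) ((data.length : Int) - 1)) 0
          = (x :: xs).getD (min 5 xs.length) 0 := by
        rw [hmin, PySem.List.pyGetD_natCast]
        have hidx : data[j + min 5 xs.length]? = (x :: xs)[min 5 xs.length]? := by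
          rw [← List.getElem?_drop, hxxs]
        simp only [List.getD, hidx]
      rw [hhead, hlast]
    · rw [pyRange_pos_nil _ _ _ (by exact_mod_cast by omega) (by norm_num)]
      have : data.drop j = [] := List.drop_eq_nil_of_le (by omega)
      rw [this, chunk6]; rfl

-- ===== VERDICT (by name: the statement is the Claim_ definition above) =====
theorem perHourMotion_spec : Claim_equal_perHourMotion := by
  intro data _
  unfold Spec_perHourMotion
  have hA : perHourMotion data = chunk6 data := by
    have h := loopA_chunk6 data.length data (le_refl _) 0 []
    simp only [Nat.mul_zero, List.nil_append] at h
    exact h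
  have hB : perHourMotion_alt data = chunk6 data := by
    have h := altB_chunk6 data data.length 0 (by omega)
    simp only [Nat.cast_zero, List.drop_zero] at h
    exact h
  rw [hA, hB]
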